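-- pv_equiv track=rewrite | github.com/VersionClimber/VersionClimber | versionclimber/version.py | hversions
-- ===== SOURCE A (Python) =====
-- def _major(version):
--     return version.split('.')[0]
--
-- def _minor(version):
--     return '.'.join(version.split('.')[:2])
--
-- def _patch(version):
--     return '.'.join(version.split('.')[:3])
--
-- def _version(version, digit=-1):
--     if len(version) < 4:
--         version = '%4s' % version
--         version = version.replace(' ', '0')
--     return version[:digit]
--
-- def hversions(seq, type='major'):
--     """ Returns a list of versions selected depending on its types (major, minor, patch)
--     """
--     _versions = {}
--     _result = []
--
--     if '.' in seq[0]: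
--         f = _major if type == 'major' else _minor if type == 'minor' else _patch
--         for v in reversed(seq):
--             ver = f(v)
--             if ver not in _versions:
--                 _versions[ver] = v
--                 _result.append(v)
--     else:
--         digit = -3 if type == 'major' else -2 if type == 'minor' else -1
--         f = _version
--         for v in reversed(seq):
--             ver = f(v, digit)
--             if ver not in _versions:
--                 _versions[ver] = v
--                 _result.append(v)
--
--     _result = list(reversed(_result))
--     # print '+++++++++++++++++++++++++++++++++++++++++++++++++++++++++'
--     # print 'HIERARCHICAL VERSIONS: ', _result
--     # print '+++++++++++++++++++++++++++++++++++++++++++++++++++++++++'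
--     return _result
-- ===== SOURCE B (Python) =====
-- def _major(version):
--     return version.split('.')[0]
--
-- def _minor(version):
--     return '.'.join(version.split('.')[:2])
--
-- def _patch(version):
--     return '.'.join(version.split('.')[:3])
--
-- def _version(version, digit=-1):
--     if len(version) < 4:
--         version = '%4s' % version
--         version = version.replace(' ', '0')
--     return version[:digit]
--
-- def hversions(seq, type='major'):
--     """Two forward passes, no reversals and no seen-set: count how many times
--     each group key occurs, then walk seq counting down and keep an element
--     exactly when its key's remaining count reaches zero (i.e. it is the last
--     of its group)."""
--     if '.' in seq[0]:
--         key = _major if type == 'major' else _minor if type == 'minor' else _patch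
--     else:
--         digit = -3 if type == 'major' else -2 if type == 'minor' else -1
--         key = lambda v: _version(v, digit)
--     remaining = {}
--     for v in seq:
--         k = key(v)
--         remaining[k] = remaining.get(k, 0) + 1
--     out = []
--     for v in seq:
--         k = key(v)
--         remaining[k] -= 1
--         if remaining[k] == 0:
--             out.append(v)
--     return out
-- ===== Notes on version B (the rewrite author's own statement) =====
-- stated objective: alternative
-- what changed: A scans reversed(seq) maintaining a seen-dict to keep the first hit per group and reverses the result; B makes two forward passes with a counter: it counts each group key, then counts down while walking seq and keeps an element exactly when its key's remaining count reaches zero (last of its group), with no reversals and no seen-set.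
import Mathlib
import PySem

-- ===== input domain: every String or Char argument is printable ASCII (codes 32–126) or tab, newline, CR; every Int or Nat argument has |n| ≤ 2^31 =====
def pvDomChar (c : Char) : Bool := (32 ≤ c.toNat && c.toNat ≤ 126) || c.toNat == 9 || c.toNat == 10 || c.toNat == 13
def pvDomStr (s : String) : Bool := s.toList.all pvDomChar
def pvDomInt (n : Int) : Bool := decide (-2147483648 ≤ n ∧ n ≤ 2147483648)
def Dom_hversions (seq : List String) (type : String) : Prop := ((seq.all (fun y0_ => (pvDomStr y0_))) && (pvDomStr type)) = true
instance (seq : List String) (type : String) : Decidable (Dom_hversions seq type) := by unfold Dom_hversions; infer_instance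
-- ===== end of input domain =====

-- B replaces A's reversed scan + seen-dict + final reverse by two forward passes with a counter:
-- count each group key, then keep an element exactly when its key's remaining count reaches zero (same return value).

-- ===== PORT A =====
-- version.split('.')  (the separator "." is non-empty, so split? is always `some`)
def pvSplitDot (v : String) : List String := (PySem.Str.split? v ".").getD []
-- _major: version.split('.')[0]; Python's split never returns an empty list, so [0] is the head
def pvMajor (v : String) : String := (pvSplitDot v).headD ""
-- _minor
def pvMinor (v : String) : String := PySem.Str.join "." (PySem.List.slice (pvSplitDot v) none (some 2))
-- _patch
def pvPatch (v : String) : String := PySem.Str.join "." (PySem.List.slice (pvSplitDot v) none (some 3))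
-- _version; '%4s' % version is ported by hand as right-justification to width 4 with spaces (exact for %s of width 4)
def pvVersion (v : String) (digit : Int) : String :=
  let cs := v.toList
  let cs := if cs.length < 4 then
              PySem.Chars.replace (List.replicate (4 - cs.length) ' ' ++ cs) [' '] ['0']
            else cs
  String.ofList (PySem.List.slice cs none (some digit))

-- body of A's for-loop: state = (_versions, _result)
def pvStepA (f : String → String) (st : PySem.Dict String String × List String) (v : String) :
    PySem.Dict String String × List String :=
  let ver := f v
  if st.1.contains ver then st else (st.1.insert ver v, st.2 ++ [v])

def hversions (seq : List String) (type : String) : List String :=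
  match seq with
  | [] => []   -- Python raises IndexError on seq[0] here; excluded by Pre_hversions
  | s0 :: _ =>
    if PySem.Str.isIn "." s0 then
      let f := if type == "major" then pvMajor else if type == "minor" then pvMinor else pvPatch
      ((seq.reverse.foldl (pvStepA f) (PySem.Dict.empty, [])).2).reverse
    else
      let digit : Int := if type == "major" then -3 else if type == "minor" then -2 else -1
      ((seq.reverse.foldl (pvStepA (fun v => pvVersion v digit)) (PySem.Dict.empty, [])).2).reverse

-- ===== PORT B =====
-- first pass: remaining[k] = remaining.get(k, 0) + 1
def pvCount (key : String → String) (d : PySem.Dict String Int) (v : String) :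
    PySem.Dict String Int :=
  d.insert (key v) (d.getD (key v) 0 + 1)

-- second pass: remaining[k] -= 1; if remaining[k] == 0: out.append(v)
def pvEmit (key : String → String) (st : PySem.Dict String Int × List String) (v : String) :
    PySem.Dict String Int × List String :=
  let k := key v
  let r := st.1.insert k (st.1.getD k 0 - 1)
  if r.getD k 0 == 0 then (r, st.2 ++ [v]) else (r, st.2)

def hversions_alt (seq : List String) (type : String) : List String :=
  match seq with
  | [] => []   -- Python raises IndexError on seq[0] here; excluded by Pre_hversions
  | s0 :: _ =>
    let key : String → String :=
      if PySem.Str.isIn "." s0 then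
        if type == "major" then pvMajor else if type == "minor" then pvMinor else pvPatch
      else
        let digit : Int := if type == "major" then -3 else if type == "minor" then -2 else -1
        fun v => pvVersion v digit
    let remaining := seq.foldl (pvCount key) PySem.Dict.empty
    (seq.foldl (pvEmit key) (remaining, [])).2

-- ===== PRECONDITION & SPEC =====
-- Both Pythons index seq[0]: on the empty list A raises IndexError, so it is excluded.
def Pre_hversions (seq : List String) (_type : String) : Prop := seq ≠ []
instance (seq : List String) (type : String) : Decidable (Pre_hversions seq type) := by
  unfold Pre_hversions; infer_instance

def pvWitness_hversions : List String × String := (["1.0", "1.1", "2.0"], "major")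

def Spec_hversions (seq : List String) (type : String) (out : List String) : Prop :=
  out = hversions_alt seq type
instance (seq : List String) (type : String) (out : List String) : Decidable (Spec_hversions seq type out) := by
  unfold Spec_hversions; infer_instance

-- ===== CLAIM (what is proved, stated in full; the proofs are below) =====
def Claim_equal_hversions : Prop := ∀ (seq : List String) (type : String),
  Dom_hversions seq type → Pre_hversions seq type → Spec_hversions seq type (hversions seq type)

-- ===== LEMMAS AND PROOFS =====

-- forward "keep iff key not seen among later keys nor in S" selection
def pvSelS (f : String → String) : List String → List String → List String
  | [], _ => []
  | v :: t, S => if f v ∈ t.map f ++ S then pvSelS f t S else v :: pvSelS f t S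

theorem pvSelS_congr (f : String → String) (l : List String) (S S' : List String)
    (h : ∀ x, x ∈ S ↔ x ∈ S') : pvSelS f l S = pvSelS f l S' := by
  induction l with
  | nil => rfl
  | cons v t ih =>
    simp only [pvSelS, List.mem_append, h (f v), ih]

theorem pvSelS_append (f : String → String) (t : List String) (x : String) (S : List String) :
    pvSelS f (t ++ [x]) S
      = pvSelS f t (f x :: S) ++ (if f x ∈ S then [] else [x]) := by
  induction t with
  | nil => simp [pvSelS]
  | cons v r ih =>
    simp only [List.cons_append, pvSelS, List.map_append, List.map_cons, List.map_nil, ih]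
    have hmem : (f v ∈ (r.map f ++ [f x]) ++ S) ↔ (f v ∈ r.map f ++ (f x :: S)) := by
      simp [List.mem_append]
    by_cases h : f v ∈ r.map f ++ (f x :: S)
    · rw [if_pos (hmem.mpr h), if_pos h]
    · rw [if_neg (fun hh => h (hmem.mp hh)), if_neg h, List.cons_append]

-- A's keep-first dedup by key f over the reversed list, given keys already seen
def pvKF (f : String → String) : List String → List String → List String
  | [], _ => []
  | v :: t, s => if f v ∈ s then pvKF f t s else v :: pvKF f t (f v :: s)

theorem pvKF_congr (f : String → String) (l : List String) (s s' : List String)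
    (h : ∀ x, x ∈ s ↔ x ∈ s') : pvKF f l s = pvKF f l s' := by
  induction l generalizing s s' with
  | nil => rfl
  | cons v t ih =>
    simp only [pvKF]
    by_cases hv : f v ∈ s
    · rw [if_pos hv, if_pos ((h _).mp hv), ih s s' h]
    · rw [if_neg hv, if_neg (fun hx => hv ((h _).mpr hx)),
        ih (f v :: s) (f v :: s') (by intro x; simp [h x])]

theorem pvFoldA_eq (f : String → String) (l : List String)
    (d : PySem.Dict String String) (r : List String) :
    (l.foldl (pvStepA f) (d, r)).2 = r ++ pvKF f l d.keys := by
  induction l generalizing d r with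
  | nil => simp [pvKF]
  | cons v t ih =>
    simp only [List.foldl_cons, pvKF]
    by_cases h : f v ∈ d.keys
    · have hc : d.contains (f v) = true := (PySem.Dict.contains_iff_mem_keys _ _).mpr h
      simp only [pvStepA, hc, if_true, if_pos h]
      exact ih d r
    · have hc : d.contains (f v) = false := by
        cases hcc : d.contains (f v)
        · rfl
        · exact absurd ((PySem.Dict.contains_iff_mem_keys _ _).mp hcc) h
      simp only [pvStepA, hc, if_neg h, Bool.false_eq_true, if_false]
      rw [ih (d.insert (f v) v) (r ++ [v])]
      have hk : (d.insert (f v) v).keys = d.keys ++ [f v] :=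
        PySem.Dict.keys_insert_of_not_contains _ _ hc
      rw [show pvKF f t (d.insert (f v) v).keys = pvKF f t (f v :: d.keys) from by
        induction t generalizing d with
        | nil => rfl
        | cons w u ih2 => exact pvKF_congr f (w :: u) _ _ (by intro x; rw [hk]; simp [or_comm])]
      rw [List.append_assoc, List.singleton_append]

theorem pvKF_rev (f : String → String) (l : List String) (S : List String) :
    (pvKF f l.reverse S).reverse = pvSelS f l S := by
  induction l using List.reverseRecOn generalizing S with
  | nil => rfl
  | append_singleton t x ih =>
    rw [List.reverse_append, List.reverse_singleton, List.singleton_append, pvSelS_append]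
    simp only [pvKF]
    by_cases h : f x ∈ S
    · rw [if_pos h, if_pos h, ih S, List.append_nil,
        pvSelS_congr f t S (f x :: S) (by intro y; simp; intro hy; exact hy ▸ h)]
    · rw [if_neg h, if_neg h, List.reverse_cons, ih (f x :: S)]

theorem pvCount_getD (key : String → String) (l : List String) (x : String) :
    (l.foldl (pvCount key) PySem.Dict.empty).getD x 0 = ((l.map key).count x : Int) := by
  have h : l.foldl (pvCount key) PySem.Dict.empty
      = (l.map key).foldl (fun d k => d.insert k (d.getD k 0 + 1)) PySem.Dict.empty := by
    rw [List.foldl_map]; rfl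
  rw [h, PySem.Dict.getD_foldl_insert_add_one, PySem.Dict.getD_empty, zero_add]

theorem pvEmit_eq (key : String → String) (l : List String)
    (d : PySem.Dict String Int) (r : List String)
    (h : ∀ x, d.getD x 0 = ((l.map key).count x : Int)) :
    (l.foldl (pvEmit key) (d, r)).2 = r ++ pvSelS key l [] := by
  induction l generalizing d r with
  | nil => simp [pvSelS]
  | cons v t ih =>
    simp only [List.foldl_cons, pvSelS, List.append_nil]
    have hk : (d.insert (key v) (d.getD (key v) 0 - 1)).getD (key v) 0
        = ((t.map key).count (key v) : Int) := by
      rw [PySem.Dict.getD_insert_self, h (key v)]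
      simp
    have hinv : ∀ x, (d.insert (key v) (d.getD (key v) 0 - 1)).getD x 0
        = ((t.map key).count x : Int) := by
      intro x
      by_cases hx : x = key v
      · subst hx; exact hk
      · rw [PySem.Dict.getD_insert, if_neg hx, h x]
        simp [Ne.symm hx]
    by_cases hmem : key v ∈ t.map key
    · have hne : ((d.insert (key v) (d.getD (key v) 0 - 1)).getD (key v) 0 == 0) = false := by
        rw [hk]
        have : (t.map key).count (key v) ≠ 0 := by
          simpa [List.count_eq_zero] using hmem
        simpa using by exact_mod_cast this
      simp only [pvEmit, hne, Bool.false_eq_true, if_false, if_pos hmem]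
      exact ih _ r hinv
    · have heq : ((d.insert (key v) (d.getD (key v) 0 - 1)).getD (key v) 0 == 0) = true := by
        rw [hk]
        have : (t.map key).count (key v) = 0 := List.count_eq_zero.mpr hmem
        simp [this]
      simp only [pvEmit, heq, if_true, if_neg hmem]
      rw [ih _ (r ++ [v]) hinv, List.append_assoc, List.singleton_append]

theorem pvMain (f : String → String) (seq : List String) :
    ((seq.reverse.foldl (pvStepA f) (PySem.Dict.empty, [])).2).reverse
      = (seq.foldl (pvEmit f) (seq.foldl (pvCount f) PySem.Dict.empty, [])).2 := by
  rw [pvFoldA_eq, List.nil_append,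
    show (PySem.Dict.empty : PySem.Dict String String).keys = [] from rfl,
    pvKF_rev, pvEmit_eq f seq _ [] (pvCount_getD f seq), List.nil_append]

-- ===== VERDICT (by name: the statement is the Claim_ definition above) =====
theorem hversions_spec : Claim_equal_hversions := by
  intro seq type _dom hpre
  unfold Spec_hversions hversions hversions_alt
  match seq with
  | [] => exact absurd rfl hpre
  | s0 :: rest =>
    by_cases hdot : PySem.Str.isIn "." s0 = true
    · simp only [hdot, if_true]
      exact pvMain _ (s0 :: rest)
    · simp only [hdot, Bool.false_eq_true, if_false]
      exact pvMain _ (s0 :: rest)
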